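-- pv_equiv track=rewrite | github.com/andrea-pustina/Elicio | src/html/webpage_lxml.py | get_previous_nodes_xpaths
-- ===== SOURCE A (Python) =====
-- def get_previous_nodes_xpaths(xpath):
--     previous_xpaths = []
--
--     xpath = xpath.split('/')[1:]
--     last_xpath = '/'
--     for x in xpath:
--         last_xpath += x
--         previous_xpaths.append(last_xpath)
--         last_xpath += '/'
--
--     return previous_xpaths
-- ===== SOURCE B (Python) =====
-- def get_previous_nodes_xpaths(xpath):
--     parts = xpath.split('/')[1:]
--     return ['/' + '/'.join(parts[:i + 1]) for i in range(len(parts))]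
-- ===== Notes on version B (the rewrite author's own statement) =====
-- stated objective: simpler
-- what changed: Replaces the stateful loop that mutates a carried accumulator string with a direct per-index construction: each prefix is computed independently as a leading slash plus the slash-join of a slice of the segment list.
import Mathlib
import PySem

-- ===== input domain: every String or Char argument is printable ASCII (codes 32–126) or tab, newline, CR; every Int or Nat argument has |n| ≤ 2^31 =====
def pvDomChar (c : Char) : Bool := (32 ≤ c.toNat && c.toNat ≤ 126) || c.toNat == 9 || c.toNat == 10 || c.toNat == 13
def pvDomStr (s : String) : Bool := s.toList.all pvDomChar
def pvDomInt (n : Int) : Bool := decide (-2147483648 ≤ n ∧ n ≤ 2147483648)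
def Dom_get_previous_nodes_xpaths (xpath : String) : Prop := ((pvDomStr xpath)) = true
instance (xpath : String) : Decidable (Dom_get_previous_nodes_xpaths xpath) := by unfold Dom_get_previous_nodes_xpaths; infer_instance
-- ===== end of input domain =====

-- B builds each prefix independently as a slash plus the slash-join of a slice of the segment list, instead of A's loop mutating a carried accumulator string; objective: simpler.

-- ===== PORT A =====
-- A's for-loop: carries last_xpath, appends the segment, records it, appends '/'.
def pvLoopA : List String → String → List String
  | [], _ => []
  | x :: xs, last_xpath =>
      let l := last_xpath ++ x
      l :: pvLoopA xs (l ++ "/")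

def get_previous_nodes_xpaths (xpath : String) : List String :=
  let parts := PySem.List.slice ((PySem.Str.split? xpath "/").getD []) (some 1) none
  pvLoopA parts "/"

-- ===== PORT B =====
def get_previous_nodes_xpaths_alt (xpath : String) : List String :=
  let parts := PySem.List.slice ((PySem.Str.split? xpath "/").getD []) (some 1) none
  (List.range parts.length).map (fun (i : Nat) =>
    "/" ++ PySem.Str.join "/" (PySem.List.slice parts none (some ((i : Int) + 1))))

-- ===== PRECONDITION & SPEC =====
def Spec_get_previous_nodes_xpaths (xpath : String) (out : List String) : Prop := out = get_previous_nodes_xpaths_alt xpath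
instance (xpath : String) (out : List String) : Decidable (Spec_get_previous_nodes_xpaths xpath out) := by unfold Spec_get_previous_nodes_xpaths; infer_instance

-- ===== CLAIM (what is proved, stated in full; the proofs are below) =====
def Claim_equal_get_previous_nodes_xpaths : Prop := ∀ (xpath : String), Dom_get_previous_nodes_xpaths xpath → Spec_get_previous_nodes_xpaths xpath (get_previous_nodes_xpaths xpath)

-- ===== LEMMAS AND PROOFS =====

theorem pvJoin_singleton (sep x : String) : PySem.Str.join sep [x] = x :=
  String.toList_injective (by
    simp [PySem.Str.toList_join, PySem.Chars.join_singleton])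

theorem pvJoin_cons (sep x q : String) (r : List String) :
    PySem.Str.join sep (x :: q :: r) = x ++ sep ++ PySem.Str.join sep (q :: r) :=
  String.toList_injective (by
    simp [PySem.Str.toList_join, PySem.Chars.join_cons_cons, String.toList_append,
      List.append_assoc])

theorem pvLoopA_eq (rest : List String) (pre : String) :
    pvLoopA rest pre = (List.range rest.length).map
      (fun i => pre ++ PySem.Str.join "/" (rest.take (i + 1))) := by
  induction rest generalizing pre with
  | nil => simp [pvLoopA]
  | cons x xs ih =>
      simp only [pvLoopA, List.length_cons, List.range_succ_eq_map, List.map_cons,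
        List.map_map]
      congr 1
      · simp [pvJoin_singleton]
      · rw [ih]
        apply List.map_congr_left
        intro i hi
        simp only [List.mem_range] at hi
        have hne : xs.take (i + 1) ≠ [] := by
          apply List.ne_nil_of_length_pos
          simp [List.length_take]
          omega
        obtain ⟨q, r, hqr⟩ := List.exists_cons_of_ne_nil hne
        simp only [Function.comp]
        rw [List.take_succ_cons, hqr, pvJoin_cons]
        simp [String.append_assoc]

theorem pvSlice_take (parts : List String) (i : ℕ) :
    PySem.List.slice parts none (some ((i : Int) + 1)) = parts.take (i + 1) := by
  have : ((i : Int) + 1) = ((i + 1 : ℕ) : Int) := by push_cast; ring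
  rw [this, PySem.List.slice_to_natCast]

-- ===== VERDICT (by name: the statement is the Claim_ definition above) =====
theorem get_previous_nodes_xpaths_spec : Claim_equal_get_previous_nodes_xpaths := by
  intro xpath _
  unfold Spec_get_previous_nodes_xpaths get_previous_nodes_xpaths get_previous_nodes_xpaths_alt
  rw [pvLoopA_eq]
  apply List.map_congr_left
  intro i _
  rw [pvSlice_take]
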